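-- pv_equiv track=rewrite | github.com/simplyjackfoster/GreenLight | ml/label_clips.py | interpolate_annotations
-- ===== SOURCE A (Python) =====
-- def interpolate_annotations(
--     keyframes: dict[int, str],
--     total_frames: int,
-- ) -> dict[int, str]:
--     if not keyframes:
--         raise ValueError("No keyframes provided")
--
--     sorted_keys = sorted(keyframes)
--     result: dict[int, str] = {}
--
--     for i, kf in enumerate(sorted_keys):
--         state = keyframes[kf]
--         end = sorted_keys[i + 1] if i + 1 < len(sorted_keys) else total_frames
--         for f in range(kf, end):
--             result[f] = state
--
--     first_state = keyframes[sorted_keys[0]]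
--     for f in range(0, sorted_keys[0]):
--         result[f] = first_state
--
--     return result
-- ===== SOURCE B (Python) =====
-- def interpolate_annotations(
--     keyframes: dict[int, str],
--     total_frames: int,
-- ) -> dict[int, str]:
--     if not keyframes:
--         raise ValueError("No keyframes provided")
--
--     ks = sorted(keyframes)
--     hi = max(ks[-1], total_frames)
--     result: dict[int, str] = {}
--
--     state = keyframes[ks[0]]
--     j = 1
--     for f in range(ks[0], hi):
--         while j < len(ks) and f >= ks[j]:
--             state = keyframes[ks[j]]
--             j += 1
--         result[f] = state
--
--     for f in range(0, ks[0]):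
--         result[f] = keyframes[ks[0]]
--
--     return result
-- ===== Notes on version B (the rewrite author's own statement) =====
-- stated objective: alternative
-- what changed: Replaces A's per-keyframe outer loop with a nested frame loop per segment by one single forward sweep over the whole frame range that advances a pointer into the remaining sorted keys, keeping the current state.
import Mathlib
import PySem

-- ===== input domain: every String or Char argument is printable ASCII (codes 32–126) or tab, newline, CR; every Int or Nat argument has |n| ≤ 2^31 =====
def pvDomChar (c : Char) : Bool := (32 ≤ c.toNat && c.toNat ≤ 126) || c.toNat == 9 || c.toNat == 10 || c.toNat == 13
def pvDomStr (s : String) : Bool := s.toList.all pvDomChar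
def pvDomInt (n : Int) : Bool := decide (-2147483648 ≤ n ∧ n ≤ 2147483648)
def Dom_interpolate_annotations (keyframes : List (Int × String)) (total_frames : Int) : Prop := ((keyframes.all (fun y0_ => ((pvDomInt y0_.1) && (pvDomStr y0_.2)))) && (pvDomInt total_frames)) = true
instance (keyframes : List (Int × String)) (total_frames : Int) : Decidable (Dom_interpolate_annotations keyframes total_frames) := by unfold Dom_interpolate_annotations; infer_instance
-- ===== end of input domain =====

-- B replaces A's per-segment nested loops by a single forward sweep over the whole frame
-- range that advances a pointer into the remaining sorted keys (objective: alternative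
-- decomposition, same cost).

-- ===== PORT A =====
def interpolate_annotations (keyframes : List (Int × String)) (total_frames : Int) : List (Int × String) :=
  let d := PySem.Dict.ofList keyframes
  -- 'if not keyframes: raise ValueError(...)' — excluded by Pre_; the port returns [] there
  if keyframes = [] then []
  else
    let sorted_keys := PySem.List.sorted d.keys (fun k => k) false
    let result : PySem.Dict Int String :=
      (PySem.List.enumerate sorted_keys 0).foldl (fun result p =>
        let i := p.1
        let kf := p.2
        let state := d.getD kf ""          -- keyframes[kf]; kf is a key, so no KeyError
        let e := if i + 1 < (sorted_keys.length : Int) then PySem.List.pyGetD sorted_keys (i + 1) 0 else total_frames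
        (PySem.List.pyRange kf e 1).foldl (fun r f => r.insert f state) result)
        PySem.Dict.empty
    let first_state := d.getD (PySem.List.pyGetD sorted_keys 0 0) ""
    let result := (PySem.List.pyRange 0 (PySem.List.pyGetD sorted_keys 0 0) 1).foldl
        (fun r f => r.insert f first_state) result
    result.items

-- ===== PORT B =====
-- the 'while j < len(ks) and f >= ks[j]: state = keyframes[ks[j]]; j += 1' loop of Source B
def pvAdvance (d : PySem.Dict Int String) (ks : List Int) (f : Int) (j : Int) (state : String) : Int × String :=
  if h : j < (ks.length : Int) ∧ PySem.List.pyGetD ks j 0 ≤ f then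
    pvAdvance d ks f (j + 1) (d.getD (PySem.List.pyGetD ks j 0) "")
  else (j, state)
termination_by ((ks.length : Int) - j).toNat
decreasing_by omega

def interpolate_annotations_alt (keyframes : List (Int × String)) (total_frames : Int) : List (Int × String) :=
  let d := PySem.Dict.ofList keyframes
  -- 'if not keyframes: raise ValueError(...)' — excluded by Pre_; the port returns [] there
  if keyframes = [] then []
  else
    let ks := PySem.List.sorted d.keys (fun k => k) false
    let k0 := PySem.List.pyGetD ks 0 0
    let hi := max (PySem.List.pyGetD ks (-1) 0) total_frames
    let acc := (PySem.List.pyRange k0 hi 1).foldl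
        (fun acc f =>
          let rs := pvAdvance d ks f acc.1 acc.2.1
          (rs.1, rs.2, acc.2.2.insert f rs.2))
        ((1 : Int), d.getD k0 "", PySem.Dict.empty)
    let result := (PySem.List.pyRange 0 k0 1).foldl (fun r f => r.insert f (d.getD k0 "")) acc.2.2
    result.items

-- ===== PRECONDITION & SPEC =====
-- Python A raises ValueError exactly on an empty keyframes dict; Pre_ excludes only that.
def Pre_interpolate_annotations (keyframes : List (Int × String)) (total_frames : Int) : Prop :=
  keyframes ≠ []
instance (keyframes : List (Int × String)) (total_frames : Int) : Decidable (Pre_interpolate_annotations keyframes total_frames) := by unfold Pre_interpolate_annotations; infer_instance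

def pvWitness_interpolate_annotations : (List (Int × String)) × Int := ([(0, "go"), (4, "stop")], 6)

def Spec_interpolate_annotations (keyframes : List (Int × String)) (total_frames : Int) (out : List (Int × String)) : Prop := out = interpolate_annotations_alt keyframes total_frames
instance (keyframes : List (Int × String)) (total_frames : Int) (out : List (Int × String)) : Decidable (Spec_interpolate_annotations keyframes total_frames out) := by unfold Spec_interpolate_annotations; infer_instance

-- ===== CLAIM (what is proved, stated in full; the proofs are below) =====
def Claim_equal_interpolate_annotations : Prop := ∀ (keyframes : List (Int × String)) (total_frames : Int), Dom_interpolate_annotations keyframes total_frames → Pre_interpolate_annotations keyframes total_frames → Spec_interpolate_annotations keyframes total_frames (interpolate_annotations keyframes total_frames)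

-- ===== LEMMAS AND PROOFS =====

-- proof-side structural version of Source B's while loop: the not-yet-reached keys as a list
def pvSweep (d : PySem.Dict Int String) (f : Int) : List Int → String → List Int × String
  | [], state => ([], state)
  | r :: t, state => if r ≤ f then pvSweep d f t (d.getD r "") else (r :: t, state)

-- insert a list of (frame, state) pairs into a dict, in order
def pvIns (res : PySem.Dict Int String) (l : List (Int × String)) : PySem.Dict Int String :=
  l.foldl (fun r p => r.insert p.1 p.2) res

-- the canonical insertion sequence: segments [a, next key) carrying the current state,
-- the final segment running up to `e`
def pvCanon (v : Int → String) (e : Int) : Int → String → List Int → List (Int × String)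
  | a, state, [] => (PySem.List.pyRange a e 1).map (fun f => (f, state))
  | a, state, r :: t => (PySem.List.pyRange a r 1).map (fun f => (f, state)) ++ pvCanon v e r (v r) t

theorem pvIns_append (res : PySem.Dict Int String) (l1 l2 : List (Int × String)) :
    pvIns res (l1 ++ l2) = pvIns (pvIns res l1) l2 := by
  simp [pvIns, List.foldl_append]

theorem pvIns_map (res : PySem.Dict Int String) (l : List Int) (s : String) :
    pvIns res (l.map (fun f => (f, s))) = l.foldl (fun r f => r.insert f s) res := by
  simp [pvIns, List.foldl_map]

-- an element of a strictly sorted list is bounded by its last element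
theorem pv_le_getLastD (l : List Int) (dflt : Int) :
    l.Pairwise (· < ·) → ∀ x ∈ l, x ≤ l.getLastD dflt := by
  induction l with
  | nil => intro _ x hx; cases hx
  | cons a t ih =>
    intro h x hx
    cases t with
    | nil => simp_all
    | cons b u =>
      have h' := List.pairwise_cons.mp h
      have hlast : List.getLastD (a :: b :: u) dflt = List.getLastD (b :: u) dflt := by simp
      rcases List.mem_cons.mp hx with rfl | hx
      · have hb : x < b := h'.1 b (by simp)
        have := ih h'.2 b (by simp)
        omega
      · have := ih h'.2 x hx
        omega

-- the final segment may equivalently run to max(last key, e)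
theorem pvCanon_hi (v : Int → String) (e : Int) :
    ∀ (rest : List Int) (a : Int) (state : String),
      pvCanon v e a state rest = pvCanon v (max (rest.getLastD a) e) a state rest := by
  intro rest
  induction rest with
  | nil =>
    intro a state
    simp only [pvCanon, List.getLastD_nil]
    rcases le_or_gt e a with h | h
    · rw [PySem.List.pyRange_one_eq_nil h, PySem.List.pyRange_one_eq_nil (by omega)]
    · rw [max_eq_right (by omega)]
  | cons r t ih =>
    intro a state
    simp only [pvCanon, List.getLastD_cons]
    rw [ih r (v r)]

-- unrolling one frame at the head of a canonical segment list
theorem pvCanon_cons_frame (v : Int → String) (e a : Int) (state : String) (t : List Int)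
    (h1 : t = [] → a < e) (h2 : ∀ r' t', t = r' :: t' → a < r') :
    pvCanon v e a state t = (a, state) :: pvCanon v e (a + 1) state t := by
  cases t with
  | nil =>
    simp only [pvCanon]
    rw [PySem.List.pyRange_one_cons (h1 rfl)]
    simp
  | cons r' t' =>
    simp only [pvCanon]
    rw [PySem.List.pyRange_one_cons (h2 r' t' rfl)]
    simp

-- ===== A-side characterisation =====
theorem pvA_fold (d : PySem.Dict Int String) (total : Int) (L : List Int) :
    ∀ (t : List Int) (n : Nat) (k : Int) (res : PySem.Dict Int String), L.drop n = k :: t →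
      (PySem.List.enumerate (k :: t) (n : Int)).foldl (fun result p =>
          let i := p.1
          let kf := p.2
          let state := d.getD kf ""
          let e := if i + 1 < (L.length : Int) then PySem.List.pyGetD L (i + 1) 0 else total
          (PySem.List.pyRange kf e 1).foldl (fun r f => r.insert f state) result) res
        = pvIns res (pvCanon (fun x => d.getD x "") total k (d.getD k "") t) := by
  intro t
  induction t with
  | nil =>
    intro n k res hdrop
    have hlen : L.length - n = 1 := by
      have := List.length_drop (l := L) (i := n)
      rw [hdrop] at this; simpa using this.symm
    have hn : n < L.length := by
      by_contra hc
      rw [List.drop_eq_nil_of_le (by omega)] at hdrop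
      cases hdrop
    have hcond : ¬ ((n : Int) + 1 < (L.length : Int)) := by omega
    simp only [PySem.List.enumerate_cons, PySem.List.enumerate_nil, List.foldl_cons,
      List.foldl_nil, hcond, if_false, pvCanon]
    rw [pvIns_map]
  | cons k' t' ih =>
    intro n k res hdrop
    have hdrop' : L.drop (n + 1) = k' :: t' := by
      have h2 : (L.drop n).drop 1 = k' :: t' := by rw [hdrop]; rfl
      rw [List.drop_drop] at h2
      simpa [Nat.add_comm] using h2
    have hlen : n + 1 < L.length := by
      have := List.length_drop (l := L) (i := n + 1)
      rw [hdrop'] at this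
      simp at this
      omega
    have hcond : (n : Int) + 1 < (L.length : Int) := by omega
    have hget : PySem.List.pyGetD L ((n : Int) + 1) 0 = k' := by
      have hcast : (n : Int) + 1 = ((n + 1 : Nat) : Int) := by push_cast; ring
      rw [hcast, PySem.List.pyGetD_natCast]
      have h0 : L[n + 1]? = some k' := by
        have := congrArg (fun l => l[0]?) hdrop'
        simpa using this
      simp [List.getD_eq_getElem?_getD, h0]
    have hstep : ((n : Int) + 1) = (((n + 1 : Nat)) : Int) := by push_cast; ring
    simp only [PySem.List.enumerate_cons, List.foldl_cons]
    simp only [hcond, if_pos, hget]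
    have IH := ih (n + 1) k'
      (List.foldl (fun r f => r.insert f (d.getD k "")) res (PySem.List.pyRange k k' 1)) hdrop'
    simp only [PySem.List.enumerate_cons, List.foldl_cons] at IH
    rw [hstep, IH]
    simp only [pvCanon]
    rw [pvIns_append, pvIns_map]

-- ===== B-side characterisation =====
theorem pvB_nil (d : PySem.Dict Int String) (l : List Int) :
    ∀ (state : String) (res : PySem.Dict Int String),
      (l.foldl (fun acc f =>
          let rs := pvSweep d f acc.1 acc.2.1
          (rs.1, rs.2, acc.2.2.insert f rs.2)) (([] : List Int), state, res))
        = ([], state, l.foldl (fun r f => r.insert f state) res) := by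
  induction l with
  | nil => intro state res; rfl
  | cons x l ih => intro state res; simpa [pvSweep] using ih state (res.insert x state)

theorem pvB_chunk (d : PySem.Dict Int String) (r : Int) (t : List Int) (l : List Int)
    (hl : ∀ f ∈ l, f < r) :
    ∀ (state : String) (res : PySem.Dict Int String),
      (l.foldl (fun acc f =>
          let rs := pvSweep d f acc.1 acc.2.1
          (rs.1, rs.2, acc.2.2.insert f rs.2)) ((r :: t), state, res))
        = (r :: t, state, l.foldl (fun r f => r.insert f state) res) := by
  induction l with
  | nil => intro state res; rfl
  | cons x l ih =>
    intro state res
    have hx : ¬ r ≤ x := by have := hl x (by simp); omega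
    simpa [pvSweep, hx] using ih (fun f hf => hl f (by simp [hf])) state (res.insert x state)

theorem pvSweep_stop (d : PySem.Dict Int String) (f : Int) (t : List Int)
    (ht : ∀ x ∈ t, f < x) (state : String) : pvSweep d f t state = (t, state) := by
  cases t with
  | nil => rfl
  | cons x u =>
    have h1 := ht x (by simp)
    have h2 : ¬ x ≤ f := by omega
    simp [pvSweep, h2]

theorem pvB_main (d : PySem.Dict Int String) (hi : Int) :
    ∀ (rest : List Int) (state : String) (a : Int) (res : PySem.Dict Int String),
      rest.Pairwise (· < ·) → (∀ r ∈ rest, a ≤ r) → (∀ r ∈ rest, r ≤ hi) →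
      ((PySem.List.pyRange a hi 1).foldl (fun acc f =>
          let rs := pvSweep d f acc.1 acc.2.1
          (rs.1, rs.2, acc.2.2.insert f rs.2)) (rest, state, res)).2.2
        = pvIns res (pvCanon (fun x => d.getD x "") hi a state rest) := by
  intro rest
  induction rest with
  | nil =>
    intro state a res _ _ _
    rw [pvB_nil]
    simp only [pvCanon]
    rw [pvIns_map]
  | cons r t ih =>
    intro state a res hp ha hh
    have har : a ≤ r := ha r (by simp)
    have hrhi : r ≤ hi := hh r (by simp)
    have hp' := List.pairwise_cons.mp hp
    rw [PySem.List.pyRange_one_append a r hi har hrhi, List.foldl_append]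
    rw [pvB_chunk d r t _ (fun f hf => ((PySem.List.mem_pyRange_one).mp hf).2)]
    simp only [pvCanon]
    rw [pvIns_append, pvIns_map]
    rcases lt_or_eq_of_le hrhi with hlt | heq
    · rw [PySem.List.pyRange_one_cons hlt]
      simp only [List.foldl_cons]
      have hadv : pvSweep d r (r :: t) state = (t, d.getD r "") := by
        simp only [pvSweep, le_refl, if_pos]
        exact pvSweep_stop d r t hp'.1 _
      rw [hadv]
      rw [ih (d.getD r "") (r + 1) _ hp'.2 (fun x hx => by have := hp'.1 x hx; omega)
            (fun x hx => hh x (by simp [hx]))]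
      rw [pvCanon_cons_frame (fun x => d.getD x "") hi r (d.getD r "") t
            (fun _ => hlt) (fun r' t' hrt => by have := hp'.1 r' (by simp [hrt]); exact this)]
      simp [pvIns]
    · subst heq
      rw [PySem.List.pyRange_one_eq_nil (le_refl r)]
      cases t with
      | nil =>
        simp only [pvCanon]
        rw [PySem.List.pyRange_one_eq_nil (le_refl r)]
        simp [pvIns]
      | cons x u =>
        have h1 := hp'.1 x (by simp)
        have h2 := hh x (by simp)
        omega

-- ===== VERDICT (by name: the statement is the Claim_ definition above) =====
-- the index-pointer while loop of port B computes pvSweep on the not-yet-reached suffix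
theorem pvAdvance_drop (d : PySem.Dict Int String) (ks : List Int) (f : Int) :
    ∀ (n j : Nat), ks.length - j = n → j ≤ ks.length → ∀ state,
      ∃ j' : Nat, j' ≤ ks.length ∧ ks.drop j' = (pvSweep d f (ks.drop j) state).1 ∧
        pvAdvance d ks f (j : Int) state = ((j' : Int), (pvSweep d f (ks.drop j) state).2) := by
  intro n
  induction n with
  | zero =>
    intro j hn hj state
    have hdrop : ks.drop j = [] := List.drop_eq_nil_of_le (by omega)
    refine ⟨j, hj, ?_, ?_⟩
    · rw [hdrop]; simp [pvSweep]
    · rw [pvAdvance, hdrop]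
      rw [dif_neg (by omega)]
      rfl
  | succ n ih =>
    intro j hn hj state
    have hjlt : j < ks.length := by omega
    have hget : PySem.List.pyGetD ks (j : Int) 0 = ks[j] := by
      rw [PySem.List.pyGetD_natCast]
      simp [List.getD_eq_getElem?_getD, List.getElem?_eq_getElem hjlt]
    have hdrop : ks.drop j = ks[j] :: ks.drop (j + 1) := List.drop_eq_getElem_cons hjlt
    by_cases hc : ks[j] ≤ f
    · obtain ⟨j', h1, h2, h3⟩ := ih (j + 1) (by omega) (by omega) (d.getD ks[j] "")
      refine ⟨j', h1, ?_, ?_⟩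
      · rw [hdrop]
        simp only [pvSweep, if_pos hc]
        exact h2
      · rw [pvAdvance]
        rw [dif_pos ⟨by exact_mod_cast hjlt, by rw [hget]; exact hc⟩]
        rw [hget]
        have hcast : (j : Int) + 1 = ((j + 1 : Nat) : Int) := by push_cast; ring
        rw [hcast, h3, hdrop]
        simp only [pvSweep, if_pos hc]
    · refine ⟨j, hj, ?_, ?_⟩
      · rw [hdrop]
        simp only [pvSweep, if_neg hc]
      · rw [pvAdvance]
        rw [dif_neg (by rw [hget]; omega)]
        rw [hdrop]
        simp only [pvSweep, if_neg hc]

theorem pvB_bridge (d : PySem.Dict Int String) (ks : List Int) :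
    ∀ (l : List Int) (j : Int), 0 ≤ j → j ≤ (ks.length : Int) →
      ∀ (state : String) (res : PySem.Dict Int String),
      ((l.foldl (fun acc f =>
          let rs := pvAdvance d ks f acc.1 acc.2.1
          (rs.1, rs.2, acc.2.2.insert f rs.2)) (j, state, res)).2.2)
      = ((l.foldl (fun acc f =>
          let rs := pvSweep d f acc.1 acc.2.1
          (rs.1, rs.2, acc.2.2.insert f rs.2)) (ks.drop j.toNat, state, res)).2.2) := by
  intro l
  induction l with
  | nil => intro j _ _ state res; rfl
  | cons f l ih =>
    intro j hj0 hjle state res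
    obtain ⟨j', h1, h2, h3⟩ :=
      pvAdvance_drop d ks f (ks.length - j.toNat) j.toNat rfl (by omega) state
    have hcast : ((j.toNat : Nat) : Int) = j := Int.toNat_of_nonneg hj0
    rw [hcast] at h3
    rw [List.foldl_cons, List.foldl_cons]
    dsimp only
    rw [h3, ← h2]
    have IH := ih (j' : Int) (by positivity) (by exact_mod_cast h1)
      ((pvSweep d f (ks.drop j.toNat) state).2)
      (res.insert f ((pvSweep d f (ks.drop j.toNat) state).2))
    simp only [Int.toNat_natCast] at IH
    exact IH

-- keys of a dict built from a non-empty pair list are non-empty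
theorem pv_keys_ne_nil (kf : List (Int × String)) (h : kf ≠ []) :
    (PySem.Dict.ofList kf).keys ≠ [] := by
  have hk : (PySem.Dict.ofList kf).keys = PySem.Set.update (PySem.Dict.empty : PySem.Dict Int String).keys (kf.map (·.1)) :=
    PySem.Dict.keys_foldl_insert_key kf (·.1) (fun d p => p.2) PySem.Dict.empty
  rcases kf with _ | ⟨p, rest⟩
  · exact absurd rfl h
  · simp only [PySem.Dict.keys_empty] at hk
    have hmem : p.1 ∈ (PySem.Dict.ofList (p :: rest)).keys := by
      rw [hk]
      rw [PySem.Set.mem_update]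
      simp
    exact List.ne_nil_of_mem hmem

theorem interpolate_annotations_spec : Claim_equal_interpolate_annotations := by
  intro keyframes total_frames _ hpre
  unfold Spec_interpolate_annotations
  unfold interpolate_annotations interpolate_annotations_alt
  rw [if_neg hpre, if_neg hpre]
  set d := PySem.Dict.ofList keyframes with hd
  set ks := PySem.List.sorted d.keys (fun k => k) false with hks
  have hne : ks ≠ [] := by
    intro hc
    have hperm := PySem.List.sorted_perm d.keys (fun k => k) false
    rw [← hks, hc] at hperm
    exact pv_keys_ne_nil keyframes hpre (List.Perm.nil_eq hperm).symm
  have hnodup : ks.Nodup := by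
    have h1 : d.keys.Nodup := PySem.Dict.nodup_keys_ofList keyframes
    exact (List.Perm.nodup_iff (PySem.List.sorted_perm d.keys (fun k => k) false)).mpr h1
  have hpair : ks.Pairwise (· < ·) := by
    have h1 : ks.Pairwise (· ≤ ·) := by
      simpa using PySem.List.sorted_pairwise (xs := d.keys) (key := fun k => k)
    exact (h1.and hnodup).imp (fun h => lt_of_le_of_ne h.1 h.2)
  obtain ⟨k0, t, hkst⟩ : ∃ k0 t, ks = k0 :: t := by
    rcases ks with _ | ⟨a, b⟩
    · exact absurd rfl hne
    · exact ⟨a, b, rfl⟩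
  have hA := pvA_fold d total_frames ks t 0 k0 PySem.Dict.empty (by simpa using hkst)
  have hget0 : PySem.List.pyGetD ks (0 : Int) 0 = k0 := by
    rw [hkst]; exact PySem.List.pyGetD_zero_cons k0 t 0
  have hgetneg : PySem.List.pyGetD ks (-1) 0 = t.getLastD k0 := by
    rw [PySem.List.pyGetD_neg_one ks 0 hne]
    simp only [hkst]
    cases t with
    | nil => rfl
    | cons x u => simp [List.getLast_cons, List.getLastD_eq_getLast?, List.getLast?_eq_some_getLast]
  have hB := pvB_main d (max (PySem.List.pyGetD ks (-1) 0) total_frames) t (d.getD k0 "") k0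
      PySem.Dict.empty (List.pairwise_cons.mp (hkst ▸ hpair)).2
      (fun r hr => le_of_lt ((List.pairwise_cons.mp (hkst ▸ hpair)).1 r hr))
      (fun r hr => by
        have h1 := pv_le_getLastD t k0 (List.pairwise_cons.mp (hkst ▸ hpair)).2 r hr
        rw [hgetneg]; omega)
  have hcanon : pvCanon (fun x => d.getD x "") total_frames k0 (d.getD k0 "") t
      = pvCanon (fun x => d.getD x "") (max (PySem.List.pyGetD ks (-1) 0) total_frames) k0 (d.getD k0 "") t := by
    rw [hgetneg]
    exact pvCanon_hi (fun x => d.getD x "") total_frames t k0 (d.getD k0 "")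
  simp only [Nat.cast_zero] at hA
  rw [hkst] at hA hB hcanon ⊢
  dsimp only at hA hB ⊢
  rw [hA, hcanon]
  simp only [PySem.List.pyGetD_zero_cons]
  rw [pvB_bridge d (k0 :: t) _ 1 (by norm_num) (by push_cast [List.length_cons]; omega) (d.getD k0 "") PySem.Dict.empty]
  simp only [Int.toNat_one, List.drop_succ_cons, List.drop_zero]
  rw [hB]
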